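-- pv_equiv track=rewrite | github.com/PUT-I/PUT-BDP-Steganography-LSB | application/LsbEncrypter.py | _bit_decryption_grayscale
-- ===== SOURCE A (Python) =====
-- def _bit_decryption_grayscale(img, bit_position: int):
--     result: str = ''
--     for row in img:
--         for pixel in row:
--             pixel &= 2 ** (bit_position - 1)
--             if pixel == 2 ** (bit_position - 1):
--                 result += '1'
--             else:
--                 result += '0'
--             if len(result) % 8 == 0 and result.endswith('00000011'):
--                 return result
--     return result
-- ===== SOURCE B (Python) =====
-- def _bit_decryption_grayscale(img, bit_position: int):
--     # Phase 1: produce the full LSB-plane bit string (no early exit).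
--     mask = 2 ** (bit_position - 1)
--     bits = ''.join('1' if pixel & mask == mask else '0'
--                    for row in img for pixel in row)
--     # Phase 2: locate the first byte boundary ending in the terminator byte.
--     i = 8
--     while i <= len(bits):
--         if bits[i - 8:i] == '00000011':
--             return bits[:i]
--         i += 8
--     return bits
-- ===== Notes on version B (the rewrite author's own statement) =====
-- stated objective: alternative
-- what changed: Replaces A's single interleaved loop (append a bit, then test length%8 and endswith after every pixel) by two separate phases: one pass building the full bit string with a precomputed mask, then a second pass over byte boundaries i=8,16,... returning the prefix at the first terminator byte.
import Mathlib
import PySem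

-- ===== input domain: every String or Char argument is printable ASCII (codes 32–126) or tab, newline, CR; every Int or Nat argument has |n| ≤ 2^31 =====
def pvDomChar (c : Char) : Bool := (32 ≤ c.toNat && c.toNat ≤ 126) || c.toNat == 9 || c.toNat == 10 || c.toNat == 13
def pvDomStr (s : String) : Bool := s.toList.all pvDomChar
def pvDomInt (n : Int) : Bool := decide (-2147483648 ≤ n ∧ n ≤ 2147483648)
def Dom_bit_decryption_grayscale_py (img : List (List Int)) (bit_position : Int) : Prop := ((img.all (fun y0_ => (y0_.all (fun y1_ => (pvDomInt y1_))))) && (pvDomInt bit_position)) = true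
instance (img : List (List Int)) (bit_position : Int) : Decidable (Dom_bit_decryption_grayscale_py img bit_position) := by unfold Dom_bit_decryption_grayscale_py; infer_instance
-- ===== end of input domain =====

-- B replaces A's interleaved produce-and-test loop by a produce phase followed by a
-- separate boundary-scanning locate phase (alternative decomposition, same cost).

-- ===== PORT A =====
-- result.endswith('00000011'): exact for this fixed 8-char suffix (False when |l| < 8).
def pvEndsTerm (l : List Char) : Bool :=
  decide (8 ≤ l.length) && (l.drop (l.length - 8) == ['0','0','0','0','0','0','1','1'])

-- inner 'for pixel in row' loop; Sum.inl = early 'return result', Sum.inr = fall through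
def pvA_pix (m : Int) (res : List Char) : List Int → (List Char ⊕ List Char)
  | [] => Sum.inr res
  | p :: ps =>
      let res' := res ++ [if PySem.Int.band p m = m then '1' else '0']
      if res'.length % 8 = 0 ∧ pvEndsTerm res' then Sum.inl res'
      else pvA_pix m res' ps

-- outer 'for row in img' loop
def pvA_row (m : Int) (res : List Char) : List (List Int) → (List Char ⊕ List Char)
  | [] => Sum.inr res
  | row :: rows =>
      match pvA_pix m res row with
      | Sum.inl r => Sum.inl r
      | Sum.inr r => pvA_row m r rows

def bit_decryption_grayscale_py (img : List (List Int)) (bit_position : Int) : String :=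
  -- 2 ** (bit_position - 1): exact for bit_position ≥ 1 (Pre_; Python makes a float below 1)
  let m : Int := 2 ^ (bit_position - 1).toNat
  String.ofList (match pvA_row m [] img with | Sum.inl r => r | Sum.inr r => r)

-- ===== PORT B =====
-- Phase 1: the full bit string
def pvB_bits (m : Int) (img : List (List Int)) : List Char :=
  img.flatMap (fun row => row.map (fun p => if PySem.Int.band p m = m then '1' else '0'))

-- Phase 2: the while loop over byte boundaries i = 8, 16, …; bits[i-8:i] = take 8 (drop (i-8))
def pvB_loc (s : List Char) (i : Nat) : List Char :=
  if h : i ≤ s.length then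
    if (s.drop (i - 8)).take 8 == ['0','0','0','0','0','0','1','1'] then s.take i
    else pvB_loc s (i + 8)
  else s
termination_by s.length + 8 - i

def bit_decryption_grayscale_py_alt (img : List (List Int)) (bit_position : Int) : String :=
  let m : Int := 2 ^ (bit_position - 1).toNat
  String.ofList (pvB_loc (pvB_bits m img) 8)

-- ===== PRECONDITION & SPEC =====
-- Pre_ excludes only bit_position ≤ 0 with at least one pixel: there Python A raises
-- TypeError ('pixel &= 2**(bit_position-1)' with a float mask), returning no value.
def Pre_bit_decryption_grayscale_py (img : List (List Int)) (bit_position : Int) : Prop :=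
  1 ≤ bit_position ∨ ∀ row ∈ img, row = []
instance (img : List (List Int)) (bit_position : Int) : Decidable (Pre_bit_decryption_grayscale_py img bit_position) := by unfold Pre_bit_decryption_grayscale_py; infer_instance

def pvWitness_bit_decryption_grayscale_py : List (List Int) × Int := ([[3, 2], [0, 1]], 1)

def Spec_bit_decryption_grayscale_py (img : List (List Int)) (bit_position : Int) (out : String) : Prop := out = bit_decryption_grayscale_py_alt img bit_position
instance (img : List (List Int)) (bit_position : Int) (out : String) : Decidable (Spec_bit_decryption_grayscale_py img bit_position out) := by unfold Spec_bit_decryption_grayscale_py; infer_instance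

-- ===== CLAIM (what is proved, stated in full; the proofs are below) =====
def Claim_equal_bit_decryption_grayscale_py : Prop := ∀ (img : List (List Int)) (bit_position : Int), Dom_bit_decryption_grayscale_py img bit_position → Pre_bit_decryption_grayscale_py img bit_position → Spec_bit_decryption_grayscale_py img bit_position (bit_decryption_grayscale_py img bit_position)

-- ===== LEMMAS AND PROOFS =====

-- the next byte boundary strictly after length n
def pvNb (n : Nat) : Nat := n / 8 * 8 + 8

theorem pvA_pix_append (m : Int) (res : List Char) (xs ys : List Int) :
    pvA_pix m res (xs ++ ys) =
      match pvA_pix m res xs with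
      | Sum.inl r => Sum.inl r
      | Sum.inr r => pvA_pix m r ys := by
  induction xs generalizing res with
  | nil => simp [pvA_pix]
  | cons p ps ih =>
      simp only [List.cons_append, pvA_pix]
      by_cases h : ((res ++ [if PySem.Int.band p m = m then '1' else '0']).length % 8 = 0 ∧
          pvEndsTerm (res ++ [if PySem.Int.band p m = m then '1' else '0']) = true)
      · rw [if_pos h, if_pos h]
      · rw [if_neg h, if_neg h]; exact ih _

theorem pvA_row_flatten (m : Int) (res : List Char) (rows : List (List Int)) :
    pvA_row m res rows = pvA_pix m res rows.flatten := by
  induction rows generalizing res with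
  | nil => simp [pvA_row, pvA_pix]
  | cons row rows ih =>
      simp only [pvA_row, List.flatten_cons, pvA_pix_append]
      cases pvA_pix m res row with
      | inl r => rfl
      | inr r => exact ih r

theorem pvB_loc_big (s : List Char) (i : Nat) (h : s.length < i) : pvB_loc s i = s := by
  rw [pvB_loc]
  rw [dif_neg (by omega)]

-- drop (n-8) of (l ++ rest) with n = l.length ≥ 8 is (last 8 of l) ++ rest; its take 8 is the last 8 of l
theorem pvSlice (l rest : List Char) (h8 : 8 ≤ l.length) :
    ((l ++ rest).drop (l.length - 8)).take 8 = l.drop (l.length - 8) := by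
  rw [List.drop_append_of_le_length (by omega)]
  rw [List.take_append_of_le_length (by simp; omega)]
  apply List.take_of_length_le
  simp
  omega

theorem pvMain (m : Int) (ps : List Int) (s : List Char) :
    (match pvA_pix m s ps with | Sum.inl r => r | Sum.inr r => r) =
      pvB_loc (s ++ ps.map (fun p => if PySem.Int.band p m = m then '1' else '0')) (pvNb s.length) := by
  induction ps generalizing s with
  | nil =>
      simp only [pvA_pix, List.map_nil, List.append_nil]
      rw [pvB_loc_big _ _ (by unfold pvNb; omega)]
  | cons p ps ih =>
      simp only [pvA_pix, List.map_cons]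
      set c : Char := if PySem.Int.band p m = m then '1' else '0' with hc
      have hassoc : s ++ c :: ps.map (fun p => if PySem.Int.band p m = m then '1' else '0')
          = (s ++ [c]) ++ ps.map (fun p => if PySem.Int.band p m = m then '1' else '0') := by
        simp
      rw [hassoc]
      set res' : List Char := s ++ [c] with hres
      set rest : List Char := ps.map (fun p => if PySem.Int.band p m = m then '1' else '0') with hrest
      have hlen : res'.length = s.length + 1 := by simp [hres]
      by_cases hcond : res'.length % 8 = 0 ∧ pvEndsTerm res' = true
      · rw [if_pos hcond]
        obtain ⟨hmod, hterm⟩ := hcond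
        have h8 : 8 ≤ res'.length := by omega
        have hi : pvNb s.length = res'.length := by unfold pvNb; omega
        have hle : res'.length ≤ (res' ++ rest).length := by simp
        rw [hi, pvB_loc, dif_pos hle, pvSlice res' rest h8]
        unfold pvEndsTerm at hterm
        simp only [Bool.and_eq_true, decide_eq_true_eq, beq_iff_eq] at hterm
        rw [if_pos (beq_iff_eq.mpr hterm.2)]
        simp
      · rw [if_neg hcond]
        rw [ih res']
        by_cases hmod : res'.length % 8 = 0
        · have h8 : 8 ≤ res'.length := by omega
          have hi : pvNb s.length = res'.length := by unfold pvNb; omega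
          have hi' : pvNb res'.length = res'.length + 8 := by unfold pvNb; omega
          rw [hi, hi']
          have hle : res'.length ≤ (res' ++ rest).length := by simp
          conv_rhs => rw [pvB_loc]
          rw [dif_pos hle, pvSlice res' rest h8]
          have hne : ¬ ((res'.drop (res'.length - 8) == ['0','0','0','0','0','0','1','1']) = true) := by
            intro h
            apply hcond
            refine ⟨hmod, ?_⟩
            unfold pvEndsTerm
            rw [h]
            simp [h8]
          rw [if_neg hne]
        · have hi : pvNb s.length = pvNb res'.length := by unfold pvNb; omega
          rw [hi]

-- ===== VERDICT (by name: the statement is the Claim_ definition above) =====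
theorem bit_decryption_grayscale_py_spec : Claim_equal_bit_decryption_grayscale_py := by
  intro img bit_position _ _
  unfold Spec_bit_decryption_grayscale_py bit_decryption_grayscale_py bit_decryption_grayscale_py_alt
  simp only [pvA_row_flatten, pvMain, List.nil_append, List.length_nil]
  unfold pvB_bits pvNb
  rw [List.flatMap_def, List.map_flatten]
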